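-- pv_equiv track=rewrite | github.com/robinyangyanfeng/FlowDoctor | src/flowdoctor/__init__.py | detect_failure_stage
-- ===== SOURCE A (Python) =====
-- def detect_failure_stage(lines: list[str]) -> str:
--     """Detect the lifecycle stage where the failure likely happened."""
--     haystack = "\n".join(lines).lower()
--
--     test_markers = ("pytest", "test session starts", "=== failures ===", "assertionerror")
--     build_markers = ("build failed", "compilation", "linker", "cmake", "make[", "cargo build")
--     env_markers = (
--         "modulenotfounderror",
--         "no module named",
--         "command not found",
--         "could not find a version",
--         "dependency",
--     )
--     runtime_markers = ("traceback", "exception", "fatal", "panic", "segmentation fault")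
--
--     if any(marker in haystack for marker in test_markers):
--         return "test"
--     if any(marker in haystack for marker in build_markers):
--         return "build"
--     if any(marker in haystack for marker in env_markers):
--         return "environment_setup"
--     if any(marker in haystack for marker in runtime_markers):
--         return "runtime"
--     return "unknown"
-- ===== SOURCE B (Python) =====
-- _STAGE_GROUPS = (
--     ("test", ("pytest", "test session starts", "=== failures ===", "assertionerror")),
--     ("build", ("build failed", "compilation", "linker", "cmake", "make[", "cargo build")),
--     ("environment_setup", ("modulenotfounderror", "no module named", "command not found",
--                            "could not find a version", "dependency")),
--     ("runtime", ("traceback", "exception", "fatal", "panic", "segmentation fault")),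
-- )
--
--
-- def detect_failure_stage(lines: list[str]) -> str:
--     """Detect the lifecycle stage where the failure likely happened."""
--     present = set()
--     for line in lines:
--         low = line.lower()
--         for stage, markers in _STAGE_GROUPS:
--             if any(m in low for m in markers):
--                 present.add(stage)
--     for stage in ("test", "build", "environment_setup", "runtime"):
--         if stage in present:
--             return stage
--     return "unknown"
-- ===== Notes on version B (the rewrite author's own statement) =====
-- stated objective: alternative
-- what changed: Instead of joining all lines into one lowered haystack and rescanning it once per stage group, B makes a single pass over the lines, lowercasing each line once and recording into a set which stages have a marker present, then resolves the stage by a fixed priority lookup; equivalence rests on no marker containing a newline.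
import Mathlib
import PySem

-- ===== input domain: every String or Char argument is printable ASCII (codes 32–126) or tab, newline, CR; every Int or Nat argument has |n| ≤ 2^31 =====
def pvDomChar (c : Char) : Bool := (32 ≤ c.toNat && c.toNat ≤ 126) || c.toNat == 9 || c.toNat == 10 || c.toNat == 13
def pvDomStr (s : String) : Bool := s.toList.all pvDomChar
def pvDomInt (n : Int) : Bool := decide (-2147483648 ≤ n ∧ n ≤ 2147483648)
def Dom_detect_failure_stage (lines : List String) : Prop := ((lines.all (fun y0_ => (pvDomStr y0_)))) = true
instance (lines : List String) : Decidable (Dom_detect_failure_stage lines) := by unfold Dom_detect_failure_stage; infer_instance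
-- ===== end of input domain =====

-- B replaces A's join-then-rescan-per-stage with a single pass over the lines that
-- records into a set which stages have a marker, then a fixed-priority lookup (alternative decomposition).


-- ===== PORT A =====
-- the four marker tuples of A (also the marker groups of B's table)
def testMarkers : List String := ["pytest", "test session starts", "=== failures ===", "assertionerror"]
def buildMarkers : List String := ["build failed", "compilation", "linker", "cmake", "make[", "cargo build"]
def envMarkers : List String := ["modulenotfounderror", "no module named", "command not found", "could not find a version", "dependency"]
def runtimeMarkers : List String := ["traceback", "exception", "fatal", "panic", "segmentation fault"]

def detect_failure_stage (lines : List String) : String :=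
  let haystack := PySem.Str.lower (PySem.Str.join "\n" lines)
  if testMarkers.any (fun m => PySem.Str.isIn m haystack) then "test"
  else if buildMarkers.any (fun m => PySem.Str.isIn m haystack) then "build"
  else if envMarkers.any (fun m => PySem.Str.isIn m haystack) then "environment_setup"
  else if runtimeMarkers.any (fun m => PySem.Str.isIn m haystack) then "runtime"
  else "unknown"

-- ===== PORT B =====
def stageGroups : List (String × List String) :=
  [("test", testMarkers), ("build", buildMarkers),
   ("environment_setup", envMarkers), ("runtime", runtimeMarkers)]

def detect_failure_stage_alt (lines : List String) : String :=
  let present : PySem.Set String :=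
    lines.foldl
      (fun s line =>
        let low := PySem.Str.lower line
        stageGroups.foldl
          (fun s g => if g.2.any (fun m => PySem.Str.isIn m low) then PySem.Set.add s g.1 else s) s)
      PySem.Set.empty
  if PySem.Set.contains present "test" then "test"
  else if PySem.Set.contains present "build" then "build"
  else if PySem.Set.contains present "environment_setup" then "environment_setup"
  else if PySem.Set.contains present "runtime" then "runtime"
  else "unknown"

-- ===== PRECONDITION & SPEC =====
def Spec_detect_failure_stage (lines : List String) (out : String) : Prop := out = detect_failure_stage_alt lines
instance (lines : List String) (out : String) : Decidable (Spec_detect_failure_stage lines out) := by unfold Spec_detect_failure_stage; infer_instance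

-- ===== CLAIM (what is proved, stated in full; the proofs are below) =====
def Claim_equal_detect_failure_stage : Prop := ∀ (lines : List String), Dom_detect_failure_stage lines → Spec_detect_failure_stage lines (detect_failure_stage lines)

-- ===== LEMMAS AND PROOFS =====

-- a prefix of a ++ c :: b avoiding c is a prefix of a
theorem prefix_avoid {c : Char} {sub a b : List Char} (hc : c ∉ sub)
    (h : sub <+: a ++ c :: b) : sub <+: a := by
  induction a generalizing sub with
  | nil =>
    cases sub with
    | nil => exact List.nil_prefix
    | cons x xs =>
      rcases List.cons_prefix_cons.mp h with ⟨hx, -⟩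
      exact absurd (hx ▸ List.mem_cons_self) hc
  | cons y a' ih =>
    cases sub with
    | nil => exact List.nil_prefix
    | cons x xs =>
      rcases List.cons_prefix_cons.mp h with ⟨hx, htl⟩
      subst hx
      exact List.cons_prefix_cons.mpr ⟨rfl, ih (fun hm => hc (List.mem_cons_of_mem _ hm)) htl⟩

-- an infix of a ++ c :: b avoiding c lies in a or in b
theorem infix_append_cons_iff {c : Char} {sub a b : List Char} (hc : c ∉ sub) :
    sub <:+: (a ++ c :: b) ↔ sub <:+: a ∨ sub <:+: b := by
  constructor
  · intro h
    induction a generalizing sub with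
    | nil =>
      rcases List.infix_cons_iff.mp h with hp | hi
      · cases sub with
        | nil => exact Or.inl (List.nil_infix)
        | cons x xs =>
          rcases List.cons_prefix_cons.mp hp with ⟨hx, -⟩
          exact absurd (hx ▸ List.mem_cons_self) hc
      · exact Or.inr hi
    | cons y a' ih =>
      rcases List.infix_cons_iff.mp h with hp | hi
      · exact Or.inl (prefix_avoid hc hp).isInfix
      · rcases ih hc hi with h1 | h2
        · exact Or.inl (h1.trans (List.infix_cons (List.infix_refl a')))
        · exact Or.inr h2
  · rintro (h | h)
    · exact h.trans ((List.prefix_append a (c :: b)).isInfix)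
    · exact h.trans ((List.suffix_cons c b).trans (List.suffix_append a (c :: b))).isInfix

-- a nonempty newline-free needle is in the "\n"-join iff it is in one of the parts
theorem isIn_join_newline {sub : List Char} (hc : '\n' ∉ sub) (hne : sub ≠ []) (parts : List (List Char)) :
    PySem.Chars.isIn sub (PySem.Chars.join ['\n'] parts) = parts.any (fun p => PySem.Chars.isIn sub p) := by
  induction parts with
  | nil =>
    rw [PySem.Chars.join_nil, List.any_nil, PySem.Chars.isIn_eq_false_iff]
    intro h
    exact hne (List.infix_nil.mp h)
  | cons p rest ih =>
    cases rest with
    | nil => simp [PySem.Chars.join_singleton]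
    | cons q r =>
      rw [PySem.Chars.join_cons_cons, List.any_cons, ← ih]
      rw [show p ++ ['\n'] ++ PySem.Chars.join ['\n'] (q :: r)
            = p ++ '\n' :: PySem.Chars.join ['\n'] (q :: r) by simp]
      rw [Bool.eq_iff_iff]
      simp only [PySem.Chars.isIn_iff_infix, Bool.or_eq_true]
      rw [infix_append_cons_iff hc]

-- lowercasing commutes with the "\n"-join
theorem lower_join (parts : List (List Char)) :
    PySem.Chars.lower (PySem.Chars.join ['\n'] parts) = PySem.Chars.join ['\n'] (parts.map PySem.Chars.lower) := by
  induction parts with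
  | nil => simp [PySem.Chars.join_nil, PySem.Chars.lower]
  | cons p rest ih =>
    cases rest with
    | nil => simp [PySem.Chars.join_singleton]
    | cons q r =>
      rw [PySem.Chars.join_cons_cons, List.map_cons, List.map_cons,
          PySem.Chars.join_cons_cons, ← List.map_cons, ← ih]
      simp [PySem.Chars.lower]
      decide

-- List.any_congr needs pointwise equality everywhere; this is the on-the-list version
theorem any_congr_mem {α : Type} {l : List α} {p q : α → Bool} (h : ∀ a ∈ l, p a = q a) :
    l.any p = l.any q := by
  induction l with
  | nil => rfl
  | cons x xs ih => simp [List.any_cons, h x List.mem_cons_self,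
      ih (fun a ha => h a (List.mem_cons_of_mem _ ha))]

-- A's haystack test, for a nonempty newline-free marker, is a per-line test
theorem isIn_haystack (m : String) (hc : '\n' ∉ m.toList) (hne : m.toList ≠ []) (lines : List String) :
    PySem.Str.isIn m (PySem.Str.lower (PySem.Str.join "\n" lines))
      = lines.any (fun l => PySem.Str.isIn m (PySem.Str.lower l)) := by
  rw [PySem.Str.isIn_eq, PySem.Str.toList_lower, PySem.Str.toList_join,
      show "\n".toList = ['\n'] from rfl, lower_join, isIn_join_newline hc hne]
  simp only [List.any_map, Function.comp_def]
  exact any_congr_mem (fun l _ => by rw [PySem.Str.isIn_eq, PySem.Str.toList_lower])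

theorem any_any_comm {α β : Type} (xs : List α) (ys : List β) (p : α → β → Bool) :
    (xs.any fun x => ys.any fun y => p x y) = ys.any fun y => xs.any fun x => p x y := by
  rw [Bool.eq_iff_iff]; simp [List.any_eq_true]; tauto

-- a whole newline-free marker group hits the haystack iff it hits some line
theorem group_hits (ms : List String) (hms : ∀ m ∈ ms, '\n' ∉ m.toList ∧ m.toList ≠ []) (lines : List String) :
    ms.any (fun m => PySem.Str.isIn m (PySem.Str.lower (PySem.Str.join "\n" lines)))
      = lines.any (fun l => ms.any (fun m => PySem.Str.isIn m (PySem.Str.lower l))) := by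
  rw [any_congr_mem (fun m hm => isIn_haystack m (hms m hm).1 (hms m hm).2 lines)]
  exact any_any_comm ms lines _

-- membership in B's stage set after one line's group scan
theorem mem_groups_fold (G : List (String × List String)) (s : PySem.Set String) (low st : String) :
    st ∈ G.foldl (fun s g => if g.2.any (fun m => PySem.Str.isIn m low) then PySem.Set.add s g.1 else s) s
      ↔ st ∈ s ∨ ∃ g ∈ G, g.1 = st ∧ g.2.any (fun m => PySem.Str.isIn m low) = true := by
  induction G generalizing s with
  | nil => simp
  | cons g G ih =>
    rw [List.foldl_cons]
    by_cases h : g.2.any (fun m => PySem.Str.isIn m low) = true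
    · rw [if_pos h, ih]
      simp only [PySem.Set.mem_add, List.mem_cons]
      constructor
      · rintro ((hs | he) | ⟨g', hg', h1, h2⟩)
        · exact Or.inl hs
        · exact Or.inr ⟨g, Or.inl rfl, he.symm, h⟩
        · exact Or.inr ⟨g', Or.inr hg', h1, h2⟩
      · rintro (hs | ⟨g', (rfl | hg'), h1, h2⟩)
        · exact Or.inl (Or.inl hs)
        · exact Or.inl (Or.inr h1.symm)
        · exact Or.inr ⟨g', hg', h1, h2⟩
    · rw [if_neg h, ih]
      constructor
      · rintro (hs | ⟨g', hg', h1, h2⟩)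
        · exact Or.inl hs
        · exact Or.inr ⟨g', List.mem_cons_of_mem _ hg', h1, h2⟩
      · rintro (hs | ⟨g', hg', h1, h2⟩)
        · exact Or.inl hs
        · rcases List.mem_cons.mp hg' with rfl | hg''
          · exact absurd h2 h
          · exact Or.inr ⟨g', hg'', h1, h2⟩

-- membership in B's stage set after the whole pass
theorem mem_outer (lines : List String) (s : PySem.Set String) (st : String) :
    st ∈ lines.foldl
      (fun s line =>
        let low := PySem.Str.lower line
        stageGroups.foldl
          (fun s g => if g.2.any (fun m => PySem.Str.isIn m low) then PySem.Set.add s g.1 else s) s) s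
      ↔ st ∈ s ∨ ∃ l ∈ lines, ∃ g ∈ stageGroups, g.1 = st ∧ g.2.any (fun m => PySem.Str.isIn m (PySem.Str.lower l)) = true := by
  induction lines generalizing s with
  | nil => simp
  | cons l ls ih =>
    rw [List.foldl_cons]
    show st ∈ List.foldl _ (stageGroups.foldl _ s) ls ↔ _
    rw [ih, mem_groups_fold]
    constructor
    · rintro ((hs | hg) | ⟨l', hl', hg'⟩)
      · exact Or.inl hs
      · exact Or.inr ⟨l, List.mem_cons_self, hg⟩
      · exact Or.inr ⟨l', List.mem_cons_of_mem _ hl', hg'⟩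
    · rintro (hs | ⟨l', hl', hg'⟩)
      · exact Or.inl (Or.inl hs)
      · rcases List.mem_cons.mp hl' with rfl | hl''
        · exact Or.inl (Or.inr hg')
        · exact Or.inr ⟨l', hl'', hg'⟩

-- B's membership test for a stage name equals the per-line any over that stage's own markers
theorem contains_present (lines : List String) (st : String) (ms : List String)
    (hmem : (st, ms) ∈ stageGroups) (h : ∀ g ∈ stageGroups, g.1 = st → g = (st, ms)) :
    PySem.Set.contains
      (lines.foldl
        (fun s line =>
          let low := PySem.Str.lower line
          stageGroups.foldl
            (fun s g => if g.2.any (fun m => PySem.Str.isIn m low) then PySem.Set.add s g.1 else s) s)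
        PySem.Set.empty) st
      = lines.any (fun l => ms.any (fun m => PySem.Str.isIn m (PySem.Str.lower l))) := by
  rw [Bool.eq_iff_iff, PySem.Set.contains_iff, mem_outer]
  simp only [List.any_eq_true]
  constructor
  · rintro (hs | ⟨l, hl, g, hg, h1, h2⟩)
    · cases hs
    · rcases h g hg h1 with rfl
      exact ⟨l, hl, h2⟩
  · rintro ⟨l, hl, hm⟩
    exact Or.inr ⟨l, hl, (st, ms), hmem, rfl, hm⟩

-- ===== VERDICT (by name: the statement is the Claim_ definition above) =====
theorem detect_failure_stage_spec : Claim_equal_detect_failure_stage := by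
  intro lines _
  show detect_failure_stage lines = detect_failure_stage_alt lines
  simp only [detect_failure_stage, detect_failure_stage_alt]
  rw [contains_present lines "test" testMarkers (by decide) (by decide),
      contains_present lines "build" buildMarkers (by decide) (by decide),
      contains_present lines "environment_setup" envMarkers (by decide) (by decide),
      contains_present lines "runtime" runtimeMarkers (by decide) (by decide),
      group_hits testMarkers (by decide) lines,
      group_hits buildMarkers (by decide) lines,
      group_hits envMarkers (by decide) lines,
      group_hits runtimeMarkers (by decide) lines]
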